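-- pv_equiv track=rewrite | github.com/KUEduPlan/KUEduPlan-backend | eduplan/based_open_plan.py | calculate_current_sem_year
-- ===== SOURCE A (Python) =====
-- def calculate_current_sem_year(passed_course):
--         # Find max YEAR
--     max_year = max(course['YEAR'] for course in passed_course)
--
--     # Filter courses with max YEAR
--     filtered_by_year = [course for course in passed_course if course['YEAR'] == max_year]
--
--     # Find max SEM from the filtered courses
--     max_sem = max(course['SEM'] for course in filtered_by_year)
--
--     # Filter courses with max SEM
--     max_y_s_p = [course for course in filtered_by_year if course['SEM'] == max_sem]
--
--     if max_y_s_p[0]['SEM'] == 2: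
--         max_y_s_p[0]['SEM'] = 1
--         max_y_s_p[0]['YEAR'] = max_y_s_p[0]['YEAR'] + 1
--     if max_y_s_p[0]['SEM'] == 1:
--         max_y_s_p[0]['SEM'] = 2
--     current_year = max_y_s_p[0]['YEAR']
--     current_sem = max_y_s_p[0]['SEM']
--     return current_year, current_sem
-- ===== SOURCE B (Python) =====
-- def calculate_current_sem_year(passed_course):
--     # one pass: first course with lexicographically maximal (YEAR, SEM)
--     best = max(passed_course, key=lambda course: (course['YEAR'], course['SEM']))
--     if best['SEM'] == 1:
--         best['SEM'] = 2
--     elif best['SEM'] == 2: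
--         best['YEAR'] = best['YEAR'] + 1
--     return best['YEAR'], best['SEM']
-- ===== Notes on version B (the rewrite author's own statement) =====
-- stated objective: simpler
-- what changed: One max() over the courses with a lexicographic (YEAR, SEM) tuple key replaces A's four staged passes (max YEAR, filter, max SEM, filter, index 0), and A's double-if net mutation (SEM 2 -> YEAR+1 with SEM staying 2, SEM 1 -> 2) is collapsed into a single if/elif.
-- outside the precondition, e.g. on calculate_current_sem_year([{'YEAR': 2, 'SEM': 1}, {'YEAR': 1}]): A returns (2, 2), B raises KeyError
import Mathlib
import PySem

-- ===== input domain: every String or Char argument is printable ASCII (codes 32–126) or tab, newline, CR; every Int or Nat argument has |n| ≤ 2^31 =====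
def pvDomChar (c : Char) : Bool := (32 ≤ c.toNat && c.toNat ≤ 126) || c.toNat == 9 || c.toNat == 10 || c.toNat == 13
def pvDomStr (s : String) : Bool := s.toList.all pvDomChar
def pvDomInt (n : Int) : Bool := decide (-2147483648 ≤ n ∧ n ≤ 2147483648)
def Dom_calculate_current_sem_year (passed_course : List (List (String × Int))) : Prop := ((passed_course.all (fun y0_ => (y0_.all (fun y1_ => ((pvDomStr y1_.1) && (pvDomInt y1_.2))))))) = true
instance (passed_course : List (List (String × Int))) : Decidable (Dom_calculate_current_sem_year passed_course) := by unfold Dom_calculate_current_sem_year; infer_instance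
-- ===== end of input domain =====

-- B computes the target course with one max() over a lexicographic (YEAR, SEM) key instead of A's staged
-- max/filter/max/filter passes (objective: simpler); the net in-place mutation of that course's dict is the same as A's.

-- shared dict access: course['KEY'] (Pre_ excludes the KeyError case where get? is none)
def pvGet (course : List (String × Int)) (k : String) : Int :=
  ((PySem.Dict.mk course).get? k).getD 0

-- ===== PORT A =====
def calculate_current_sem_year (passed_course : List (List (String × Int))) : Int × Int :=
  let max_year := (PySem.List.max? (passed_course.map (fun course => pvGet course "YEAR")) (fun v => v)).getD 0
  let filtered_by_year := passed_course.filter (fun course => pvGet course "YEAR" == max_year)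
  let max_sem := (PySem.List.max? (filtered_by_year.map (fun course => pvGet course "SEM")) (fun v => v)).getD 0
  let max_y_s_p := filtered_by_year.filter (fun course => pvGet course "SEM" == max_sem)
  let first := PySem.Dict.mk ((PySem.List.pyGet? max_y_s_p 0).getD [])
  let first :=
    if ((first.get? "SEM").getD 0 == 2) then
      let tmp := first.insert "SEM" 1
      tmp.insert "YEAR" (((tmp.get? "YEAR").getD 0) + 1)
    else first
  let first := if ((first.get? "SEM").getD 0 == 1) then first.insert "SEM" 2 else first
  (((first.get? "YEAR").getD 0), ((first.get? "SEM").getD 0))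

-- ===== PORT B =====
def calculate_current_sem_year_alt (passed_course : List (List (String × Int))) : Int × Int :=
  let best := PySem.Dict.mk ((PySem.List.max2? passed_course (fun course => pvGet course "YEAR") (fun course => pvGet course "SEM")).getD [])
  let best :=
    if ((best.get? "SEM").getD 0 == 1) then best.insert "SEM" 2
    else if ((best.get? "SEM").getD 0 == 2) then best.insert "YEAR" (((best.get? "YEAR").getD 0) + 1)
    else best
  (((best.get? "YEAR").getD 0), ((best.get? "SEM").getD 0))

-- ===== PRECONDITION & SPEC =====
-- Pre_ excludes (a) the empty list, where both programs raise ValueError; (b) courses whose association list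
-- has a duplicate key, which a Python dict cannot represent (first-match lookup vs last-write-wins); and
-- (c) a course missing the 'YEAR' or 'SEM' key, where B's single-pass key raises KeyError (A raises too,
-- except for a missing 'SEM' on a non-maximal-YEAR course, which A never reads).
def Pre_calculate_current_sem_year (passed_course : List (List (String × Int))) : Prop :=
  passed_course ≠ [] ∧ ∀ course ∈ passed_course,
    (PySem.Dict.mk course).contains "YEAR" = true ∧ (PySem.Dict.mk course).contains "SEM" = true ∧
    (course.map Prod.fst).Nodup
instance (passed_course : List (List (String × Int))) : Decidable (Pre_calculate_current_sem_year passed_course) := by unfold Pre_calculate_current_sem_year; infer_instance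

def pvWitness_calculate_current_sem_year : (List (List (String × Int))) :=
  [[("YEAR", 2), ("SEM", 1)], [("YEAR", 1), ("SEM", 2)]]

def Spec_calculate_current_sem_year (passed_course : List (List (String × Int))) (out : Int × Int) : Prop := out = calculate_current_sem_year_alt passed_course
instance (passed_course : List (List (String × Int))) (out : Int × Int) : Decidable (Spec_calculate_current_sem_year passed_course out) := by unfold Spec_calculate_current_sem_year; infer_instance

-- ===== CLAIM (what is proved, stated in full; the proofs are below) =====
def Claim_equal_calculate_current_sem_year : Prop := ∀ (passed_course : List (List (String × Int))), Dom_calculate_current_sem_year passed_course → Pre_calculate_current_sem_year passed_course → Spec_calculate_current_sem_year passed_course (calculate_current_sem_year passed_course)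

-- ===== LEMMAS AND PROOFS =====

-- lexicographic "(k1 c, k2 c) ≤ (k1 b, k2 b)"
def pvLexLe {α : Type} (k1 k2 : α → Int) (c b : α) : Prop :=
  k1 c < k1 b ∨ (k1 c = k1 b ∧ k2 c ≤ k2 b)

-- invariant of max2?'s fold, from an accumulator `some m`
theorem pvMax2Go {α : Type} (k1 k2 : α → Int) :
    ∀ (xs : List α) (m : α),
      ∃ b, List.foldl
            (fun acc x =>
              match acc with
              | none => some x
              | some m => if (decide (k1 m < k1 x) || !decide (k1 x < k1 m) && decide (k2 m < k2 x)) = true then some x else some m)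
            (some m) xs = some b ∧
          (b = m ∨ b ∈ xs) ∧ ∀ c, (c = m ∨ c ∈ xs) → pvLexLe k1 k2 c b := by
  intro xs
  induction xs with
  | nil =>
    intro m
    refine ⟨m, rfl, Or.inl rfl, ?_⟩
    rintro c (rfl | hc)
    · exact Or.inr ⟨rfl, le_refl _⟩
    · exact absurd hc (List.not_mem_nil)
  | cons x xs ih =>
    intro m
    by_cases hstep : k1 m < k1 x ∨ (k1 m ≤ k1 x ∧ k2 m < k2 x)
    · obtain ⟨b, hfold, hmem, hle⟩ := ih x
      refine ⟨b, by simpa [hstep] using hfold, ?_, ?_⟩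
      · rcases hmem with h | h
        · exact Or.inr (h ▸ List.mem_cons_self)
        · exact Or.inr (List.mem_cons_of_mem _ h)
      · rintro c (rfl | hc)
        · have hxb : pvLexLe k1 k2 x b := hle x (Or.inl rfl)
          simp only [pvLexLe] at hxb ⊢
          omega
        · rcases List.mem_cons.mp hc with rfl | hc'
          · exact hle c (Or.inl rfl)
          · exact hle c (Or.inr hc')
    · obtain ⟨b, hfold, hmem, hle⟩ := ih m
      refine ⟨b, by simpa [hstep] using hfold, ?_, ?_⟩
      · rcases hmem with h | h
        · exact Or.inl h
        · exact Or.inr (List.mem_cons_of_mem _ h)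
      · rintro c (rfl | hc)
        · exact hle c (Or.inl rfl)
        · rcases List.mem_cons.mp hc with rfl | hc'
          · have hmb : pvLexLe k1 k2 m b := hle m (Or.inl rfl)
            simp only [pvLexLe] at hmb ⊢
            omega
          · exact hle c (Or.inr hc')

-- max2? on a nonempty list: the first lexicographically maximal element
theorem pvMax2Spec {α : Type} (k1 k2 : α → Int) (h : α) (t : List α) :
    ∃ b, PySem.List.max2? (h :: t) k1 k2 = some b ∧ b ∈ h :: t ∧
      ∀ c ∈ h :: t, pvLexLe k1 k2 c b := by
  obtain ⟨b, hfold, hmem, hle⟩ := pvMax2Go k1 k2 t h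
  refine ⟨b, ?_, ?_, ?_⟩
  · simpa [PySem.List.max2?] using hfold
  · rcases hmem with rfl | hm
    · exact List.mem_cons_self
    · exact List.mem_cons_of_mem _ hm
  · intro c hc
    rcases List.mem_cons.mp hc with rfl | hc'
    · exact hle c (Or.inl rfl)
    · exact hle c (Or.inr hc')

-- the common tail: both mutation blocks compute the same function of (YEAR, SEM)
theorem pvTailEq (d e : PySem.Dict String Int)
    (hy : (d.get? "YEAR").getD 0 = (e.get? "YEAR").getD 0)
    (hs : (d.get? "SEM").getD 0 = (e.get? "SEM").getD 0) :
    (let first :=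
      if ((d.get? "SEM").getD 0 == 2) then
        let tmp := d.insert "SEM" 1
        tmp.insert "YEAR" (((tmp.get? "YEAR").getD 0) + 1)
      else d
     let first := if ((first.get? "SEM").getD 0 == 1) then first.insert "SEM" 2 else first
     (((first.get? "YEAR").getD 0), ((first.get? "SEM").getD 0))) =
    (let best :=
      if ((e.get? "SEM").getD 0 == 1) then e.insert "SEM" 2
      else if ((e.get? "SEM").getD 0 == 2) then e.insert "YEAR" (((e.get? "YEAR").getD 0) + 1)
      else e
     (((best.get? "YEAR").getD 0), ((best.get? "SEM").getD 0))) := by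
  have hne : ("YEAR" : String) ≠ "SEM" := by decide
  have hne' : ("SEM" : String) ≠ "YEAR" := by decide
  by_cases h2 : (d.get? "SEM").getD 0 = 2
  · simp [h2, ← hs, ← hy, PySem.Dict.get?_insert_self, PySem.Dict.get?_insert_of_ne _ _ hne,
      PySem.Dict.get?_insert_of_ne _ _ hne']
  · by_cases h1 : (d.get? "SEM").getD 0 = 1
    · simp [h1, ← hs, ← hy, PySem.Dict.get?_insert_self,
        PySem.Dict.get?_insert_of_ne _ _ hne]
    · simp [h1, h2, ← hs, ← hy]

-- ===== VERDICT (by name: the statement is the Claim_ definition above) =====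
theorem calculate_current_sem_year_spec : Claim_equal_calculate_current_sem_year := by
  intro pc _hdom hpre
  obtain ⟨hne, _hkeys⟩ := hpre
  obtain ⟨h, t, rfl⟩ := List.exists_cons_of_ne_nil hne
  unfold Spec_calculate_current_sem_year
  -- B's chosen course
  obtain ⟨b, hb, hbmem, hble⟩ :=
    pvMax2Spec (fun course => pvGet course "YEAR") (fun course => pvGet course "SEM") h t
  -- A's max_year is Y b
  obtain ⟨m, hm⟩ : ∃ m, PySem.List.max? ((h :: t).map (fun course => pvGet course "YEAR")) (fun v => v) = some m := by
    cases hmx : PySem.List.max? ((h :: t).map (fun course => pvGet course "YEAR")) (fun v => v) with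
    | none => simp [PySem.List.max?_eq_none_iff] at hmx
    | some m => exact ⟨m, rfl⟩
  have hmY : m = pvGet b "YEAR" := by
    have h1 : pvGet b "YEAR" ≤ m :=
      PySem.List.max?_isMax hm _ (List.mem_map_of_mem hbmem)
    have h2 : m ∈ (h :: t).map (fun course => pvGet course "YEAR") := PySem.List.max?_mem hm
    obtain ⟨c, hc, rfl⟩ := List.mem_map.mp h2
    have := hble c hc
    simp only [pvLexLe] at this
    omega
  -- b survives the YEAR filter
  have hbf : b ∈ (h :: t).filter (fun course => pvGet course "YEAR" == m) := by
    simp [List.mem_filter, hbmem, hmY]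
  -- A's max_sem is S b
  obtain ⟨m2, hm2⟩ : ∃ m2, PySem.List.max? (((h :: t).filter (fun course => pvGet course "YEAR" == m)).map (fun course => pvGet course "SEM")) (fun v => v) = some m2 := by
    cases hmx : PySem.List.max? (((h :: t).filter (fun course => pvGet course "YEAR" == m)).map (fun course => pvGet course "SEM")) (fun v => v) with
    | none =>
      rw [PySem.List.max?_eq_none_iff, List.map_eq_nil_iff] at hmx
      rw [hmx] at hbf; simp at hbf
    | some m2 => exact ⟨m2, rfl⟩
  have hm2S : m2 = pvGet b "SEM" := by
    have h1 : pvGet b "SEM" ≤ m2 :=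
      PySem.List.max?_isMax hm2 _ (List.mem_map_of_mem hbf)
    have h2 := PySem.List.max?_mem hm2
    obtain ⟨c, hc, rfl⟩ := List.mem_map.mp h2
    have hcmem := (List.mem_filter.mp hc).1
    have hcy : pvGet c "YEAR" = m := by
      have := (List.mem_filter.mp hc).2; simpa using this
    have := hble c hcmem
    simp only [pvLexLe] at this
    omega
  -- the first course of max_y_s_p has the same YEAR and SEM as b
  have hbf2 : b ∈ ((h :: t).filter (fun course => pvGet course "YEAR" == m)).filter (fun course => pvGet course "SEM" == m2) := by
    simp [List.mem_filter, (List.mem_filter.mp hbf).1, (List.mem_filter.mp hbf).2, hm2S]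
  obtain ⟨d, t2, hd⟩ := List.exists_cons_of_ne_nil (List.ne_nil_of_mem hbf2)
  have hdmem : d ∈ ((h :: t).filter (fun course => pvGet course "YEAR" == m)).filter (fun course => pvGet course "SEM" == m2) := by
    rw [hd]; exact List.mem_cons_self
  have hdy : pvGet d "YEAR" = pvGet b "YEAR" := by
    have := (List.mem_filter.mp (List.mem_filter.mp hdmem).1).2
    rw [hmY] at this; simpa using this
  have hds : pvGet d "SEM" = pvGet b "SEM" := by
    have := (List.mem_filter.mp hdmem).2
    rw [hm2S] at this; simpa using this
  -- assemble
  show calculate_current_sem_year (h :: t) = calculate_current_sem_year_alt (h :: t)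
  have hget0 : PySem.List.pyGet? (d :: t2) (0 : Int) = some d := by
    simp [PySem.List.pyGet?, PySem.List.pyIdx?]
  simp only [calculate_current_sem_year, calculate_current_sem_year_alt, hm, hm2, hb,
    Option.getD_some, hd, hget0]
  exact pvTailEq (PySem.Dict.mk d) (PySem.Dict.mk b) hdy hds
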